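-- pv_equiv track=rewrite | github.com/RRoundTable/Data_Structure_Study | tree/1.py | solution
-- ===== SOURCE A (Python) =====
-- def solution(A):
--     A = sorted(A)
--     count  = 0
--     for i in range(len(A) - 1):
--         if A[i] == A[i+1]:
--             continue
--         elif A[i] + A[i+1] ==7:
--             count += 2
--         else:
--             count +=1
--
--     return count
-- ===== SOURCE B (Python) =====
-- def solution(A):
--     S = set(A)
--     if not S:
--         return 0
--     bonus = sum(1 for x in S
--                 if x < 7 - x and 7 - x in S
--                 and not any(x < z < 7 - x for z in S))
--     return len(S) - 1 + bonus
-- ===== Notes on version B (the rewrite author's own statement) =====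
-- stated objective: alternative
-- what changed: B never sorts: it builds the set of values and computes len(S)-1 plus, by pure membership arithmetic, the number of x in S whose complement 7-x is also in S with no value of S strictly between them, instead of A's sort-then-scan over adjacent pairs.
import Mathlib
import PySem

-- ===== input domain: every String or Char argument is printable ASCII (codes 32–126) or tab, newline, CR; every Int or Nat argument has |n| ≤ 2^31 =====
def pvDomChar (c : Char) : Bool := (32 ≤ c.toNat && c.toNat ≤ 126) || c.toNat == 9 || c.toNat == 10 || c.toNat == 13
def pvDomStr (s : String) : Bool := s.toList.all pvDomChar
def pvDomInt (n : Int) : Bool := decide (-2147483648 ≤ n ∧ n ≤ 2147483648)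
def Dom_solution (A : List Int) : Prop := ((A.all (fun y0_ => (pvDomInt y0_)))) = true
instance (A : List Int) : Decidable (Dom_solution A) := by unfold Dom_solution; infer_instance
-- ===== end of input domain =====

-- B avoids sorting entirely: it counts distinct values and, by set-membership arithmetic, the
-- adjacent complement pairs (x, 7-x) with nothing of the set strictly between (alternative).

-- ===== PORT A =====
def solution (A : List Int) : Int :=
  let As := PySem.List.sorted A (fun x => x)
  (PySem.List.pyRange 0 ((As.length : Int) - 1)).foldl
    (fun count i =>
      if PySem.List.pyGetD As i 0 = PySem.List.pyGetD As (i + 1) 0 then count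
      else if PySem.List.pyGetD As i 0 + PySem.List.pyGetD As (i + 1) 0 = 7 then count + 2
      else count + 1) 0

-- ===== PORT B =====
-- the generator's filter condition: x < 7-x and 7-x in S and not any(x < z < 7-x for z in S)
def bPred (S : PySem.Set Int) (x : Int) : Bool :=
  decide (x < 7 - x) && PySem.Set.contains S (7 - x) &&
    !(S.any (fun z => decide (x < z) && decide (z < 7 - x)))

def solution_alt (A : List Int) : Int :=
  let S := PySem.Set.ofList A
  if S = [] then 0
  else
    let bonus : Int := ((S.filter (bPred S)).length : Int)   -- sum of 1 over the filtered set
    ((S.length : Int) - 1) + bonus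

-- ===== PRECONDITION & SPEC =====
def Spec_solution (A : List Int) (out : Int) : Prop := out = solution_alt A
instance (A : List Int) (out : Int) : Decidable (Spec_solution A out) := by unfold Spec_solution; infer_instance

-- ===== CLAIM (what is proved, stated in full; the proofs are below) =====
def Claim_equal_solution : Prop := ∀ (A : List Int), Dom_solution A → Spec_solution A (solution A)

-- ===== LEMMAS AND PROOFS =====

-- A's weight on an adjacent pair (0 means the 'continue' branch)
def wA (a b : Int) : Int := if a = b then 0 else if a + b = 7 then 2 else 1
-- weight on an adjacent pair of distinct values
def wB (a b : Int) : Int := if a + b = 7 then 2 else 1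

def pairSum (w : Int → Int → Int) (L : List Int) : Int :=
  ((L.zip L.tail).map (fun p => w p.1 p.2)).sum

-- remove adjacent duplicates, keeping the head
def dd : List Int → List Int
  | [] => []
  | [x] => [x]
  | x :: y :: t => if x = y then dd (y :: t) else x :: dd (y :: t)

theorem dd_cons (y : Int) (t : List Int) : ∃ r, dd (y :: t) = y :: r := by
  cases t with
  | nil => exact ⟨[], rfl⟩
  | cons z t' =>
    by_cases h : y = z
    · obtain ⟨r, hr⟩ := dd_cons z t'
      exact ⟨r, by simp [dd, h, hr]⟩
    · exact ⟨dd (z :: t'), by simp [dd, h]⟩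

theorem mem_dd (L : List Int) (x : Int) : x ∈ dd L ↔ x ∈ L := by
  match L with
  | [] => simp [dd]
  | [y] => simp [dd]
  | y :: z :: t =>
    by_cases h : y = z
    · subst h
      simp [dd, mem_dd (y :: t) x]
    · simp [dd, h, mem_dd (z :: t) x]

theorem dd_pairwise (L : List Int) (h : L.Pairwise (· ≤ ·)) :
    (dd L).Pairwise (· < ·) := by
  match L with
  | [] => simp [dd]
  | [x] => simp [dd]
  | x :: y :: t =>
    rw [List.pairwise_cons] at h
    obtain ⟨hx, hyt⟩ := h
    by_cases hxy : x = y
    · simpa [dd, hxy] using dd_pairwise (y :: t) hyt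
    · have ih := dd_pairwise (y :: t) hyt
      rw [show dd (x :: y :: t) = x :: dd (y :: t) from by simp [dd, hxy]]
      refine List.pairwise_cons.2 ⟨?_, ih⟩
      intro e he
      have he' : e ∈ y :: t := (mem_dd _ _).1 he
      have hxlty : x < y := lt_of_le_of_ne (hx y (by simp)) hxy
      rcases List.mem_cons.1 he' with rfl | he''
      · exact hxlty
      · have : y ≤ e := (List.pairwise_cons.1 hyt).1 e he''
        omega

theorem pairSum_dd (L : List Int) : pairSum wA L = pairSum wB (dd L) := by
  match L with
  | [] => simp [dd, pairSum]
  | [x] => simp [dd, pairSum]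
  | x :: y :: t =>
    have ih := pairSum_dd (y :: t)
    by_cases h : x = y
    · simp [pairSum, dd, h, wA] at ih ⊢
      simpa [h] using ih
    · obtain ⟨r, hr⟩ := dd_cons y t
      simp [dd, h, hr] at ih ⊢
      simp [pairSum, wA, wB, h] at ih ⊢
      omega

-- A's index loop equals the adjacent-pair sum with weight wA
theorem loop_eq_pairSum (L : List Int) :
    (PySem.List.pyRange 0 ((L.length : Int) - 1)).foldl
      (fun count i =>
        if PySem.List.pyGetD L i 0 = PySem.List.pyGetD L (i + 1) 0 then count
        else if PySem.List.pyGetD L i 0 + PySem.List.pyGetD L (i + 1) 0 = 7 then count + 2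
        else count + 1) 0 = pairSum wA L := by
  have hstep : ∀ (l : List Int) (c : Int),
      l.foldl (fun count i =>
        if PySem.List.pyGetD L i 0 = PySem.List.pyGetD L (i + 1) 0 then count
        else if PySem.List.pyGetD L i 0 + PySem.List.pyGetD L (i + 1) 0 = 7 then count + 2
        else count + 1) c
      = c + (l.map (fun i => wA (PySem.List.pyGetD L i 0) (PySem.List.pyGetD L (i + 1) 0))).sum := by
    intro l
    induction l with
    | nil => simp
    | cons a l ih =>
      intro c
      simp only [List.foldl_cons, List.map_cons, List.sum_cons, ih, wA]
      split_ifs <;> ring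
  rw [hstep]
  have hmap : (PySem.List.pyRange 0 ((L.length : Int) - 1)).map
      (fun i => wA (PySem.List.pyGetD L i 0) (PySem.List.pyGetD L (i + 1) 0))
      = (L.zip L.tail).map (fun p => wA p.1 p.2) := by
    apply List.ext_getElem
    · simp only [List.length_map, PySem.List.length_pyRange_one, List.length_zip,
        List.length_tail]
      omega
    · intro k h1 h2
      have hk : (k : Int) < (L.length : Int) - 1 := by
        simp [PySem.List.length_pyRange_one] at h1; omega
      simp only [List.getElem_map, PySem.List.getElem_pyRange_one, List.getElem_zip, zero_add]
      have hk1 : k < L.length := by omega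
      have hk2 : k + 1 < L.length := by omega
      have e1 : PySem.List.pyGetD L (k : Int) 0 = L[k] := by
        rw [PySem.List.pyGetD_natCast, List.getD_eq_getElem _ _ hk1]
      have e2 : PySem.List.pyGetD L ((k : Int) + 1) 0 = L[k + 1] := by
        rw [show ((k : Int) + 1) = ((k + 1 : Nat) : Int) from by push_cast; ring,
          PySem.List.pyGetD_natCast, List.getD_eq_getElem _ _ hk2]
      rw [e1, e2, List.getElem_tail]
  rw [hmap]
  simp [pairSum]

theorem dd_sorted_eq (A : List Int) :
    PySem.List.sorted (PySem.Set.ofList A) (fun x => x)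
      = dd (PySem.List.sorted A (fun x => x)) := by
  apply PySem.List.sorted_eq_of_perm_of_pairwise_lt
  · rw [List.perm_ext_iff_of_nodup
      ((dd_pairwise _ (PySem.List.sorted_pairwise A (fun x => x))).nodup)
      (PySem.Set.nodup_ofList A)]
    intro a
    rw [mem_dd, PySem.List.mem_sorted, PySem.Set.mem_ofList]
  · exact dd_pairwise _ (PySem.List.sorted_pairwise A (fun x => x))

-- bPred only looks at MEMBERSHIP of its list argument
theorem bPred_congr (S T : List Int) (hmem : ∀ z, z ∈ S ↔ z ∈ T) (x : Int) :
    bPred S x = bPred T x := by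
  unfold bPred
  have h1 : PySem.Set.contains S (7 - x) = PySem.Set.contains T (7 - x) := by
    rw [Bool.eq_iff_iff]
    simp [PySem.Set.contains_eq_listContains, hmem (7 - x)]
  have h2 : (S.any (fun z => decide (x < z) && decide (z < 7 - x)))
      = (T.any (fun z => decide (x < z) && decide (z < 7 - x))) := by
    rw [Bool.eq_iff_iff]
    simp only [List.any_eq_true]
    constructor
    · rintro ⟨z, hz, hp⟩; exact ⟨z, (hmem z).1 hz, hp⟩
    · rintro ⟨z, hz, hp⟩; exact ⟨z, (hmem z).2 hz, hp⟩
  rw [h1, h2]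

-- on a strictly increasing list, bPred of the head detects exactly a first pair summing to 7
theorem bPred_head (a b : Int) (t : List Int) (h : (a :: b :: t).Pairwise (· < ·)) :
    bPred (a :: b :: t) a = decide (a + b = 7) := by
  rw [List.pairwise_cons] at h
  obtain ⟨ha, hb⟩ := h
  have hab : a < b := ha b (by simp)
  have ht : ∀ z ∈ t, b < z := (List.pairwise_cons.1 hb).1
  by_cases h7 : a + b = 7
  · have hb7 : b = 7 - a := by omega
    unfold bPred
    simp only [h7, decide_true]
    have c1 : decide (a < 7 - a) = true := by simp; omega
    have c2 : PySem.Set.contains (a :: b :: t) (7 - a) = true := by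
      simp [PySem.Set.contains_eq_listContains, List.contains_iff_mem, hb7]
    have c3 : ((a :: b :: t).any (fun z => decide (a < z) && decide (z < 7 - a))) = false := by
      simp only [List.any_eq_false]
      intro z hz
      rcases List.mem_cons.1 hz with rfl | hz'
      · simp
      rcases List.mem_cons.1 hz' with rfl | hz''
      · simp; omega
      · have := ht z hz''
        simp; omega
    rw [c1, c2, c3]
    simp
  · unfold bPred
    simp only [h7, decide_false]
    by_cases hlt : a < 7 - a
    · by_cases hc : (7 - a) ∈ (a :: b :: t)
      · -- then 7 - a ∈ t (not a since a < 7-a, not b since a+b ≠ 7), so b is strictly between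
        have h7t : (7 - a) ∈ t := by
          rcases List.mem_cons.1 hc with he | hc'
          · omega
          rcases List.mem_cons.1 hc' with he | h''
          · omega
          · exact h''
        have hb7 : b < 7 - a := ht _ h7t
        have c3 : ((a :: b :: t).any (fun z => decide (a < z) && decide (z < 7 - a))) = true := by
          simp only [List.any_eq_true]
          exact ⟨b, by simp, by simp [hab, hb7]⟩
        rw [c3]
        simp
      · have hcf : PySem.Set.contains (a :: b :: t) (7 - a) = false := by
          rw [Bool.eq_false_iff]
          intro hcc
          exact hc (by simpa [PySem.Set.contains_eq_listContains] using hcc)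
        rw [hcf]
        simp
    · simp [hlt]

-- for an element of the tail, dropping a strictly smaller head does not change bPred
theorem bPred_tail (a x : Int) (r : List Int) (hax : ∀ z ∈ r, a < z) (hx : x ∈ r) :
    bPred (a :: r) x = bPred r x := by
  unfold bPred
  have haxx : a < x := hax x hx
  by_cases hlt : x < 7 - x
  · have h1 : PySem.Set.contains (a :: r) (7 - x) = PySem.Set.contains r (7 - x) := by
      simp only [PySem.Set.contains_eq_listContains]
      have : (7 - x) ≠ a := by omega
      simp [List.contains_iff_mem, this]
    have h2 : ((a :: r).any (fun z => decide (x < z) && decide (z < 7 - x)))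
        = (r.any (fun z => decide (x < z) && decide (z < 7 - x))) := by
      simp only [List.any_cons]
      have : (decide (x < a) && decide (a < 7 - x)) = false := by simp; omega
      rw [this, Bool.false_or]
    rw [h1, h2]
  · simp [hlt]

-- the key count: on a strictly increasing list, the pair sum is (length - 1) + #bonus pairs
theorem pairSum_count (L : List Int) (h : L.Pairwise (· < ·)) :
    pairSum wB L
      = if L = [] then 0 else ((L.length : Int) - 1) + ((L.filter (bPred L)).length : Int) := by
  match L with
  | [] => simp [pairSum]
  | [x] =>
    have : bPred [x] x = false := by
      unfold bPred
      by_cases hlt : x < 7 - x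
      · have : PySem.Set.contains [x] (7 - x) = false := by
          simp [PySem.Set.contains_eq_listContains, List.contains_iff_mem]; omega
        rw [this]; simp
      · simp [hlt]
    simp [pairSum, this]
  | a :: b :: t =>
    have htail : (b :: t).Pairwise (· < ·) := (List.pairwise_cons.1 h).2
    have ih := pairSum_count (b :: t) htail
    have hps : pairSum wB (a :: b :: t) = wB a b + pairSum wB (b :: t) := by
      simp [pairSum]
    have hfa : (a :: b :: t).filter (bPred (a :: b :: t))
        = (if a + b = 7 then [a] else []) ++ ((b :: t).filter (bPred (b :: t))) := by
      rw [List.filter_cons]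
      have hcongr : (b :: t).filter (bPred (a :: b :: t)) = (b :: t).filter (bPred (b :: t)) := by
        apply List.filter_congr
        intro x hx
        exact bPred_tail a x (b :: t) (List.pairwise_cons.1 h).1 hx
      rw [hcongr, bPred_head a b t h]
      by_cases h7 : a + b = 7 <;> simp [h7]
    rw [hps, hfa]
    simp only [if_neg (by simp : ¬ a :: b :: t = ([] : List Int)),
      if_neg (by simp : ¬ b :: t = ([] : List Int))] at ih ⊢
    by_cases h7 : a + b = 7 <;>
      simp [wB, h7, ih] <;> push_cast <;> omega

-- ===== VERDICT (by name: the statement is the Claim_ definition above) =====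
theorem solution_spec : Claim_equal_solution := by
  intro A _
  show solution A = solution_alt A
  have hU := dd_sorted_eq A
  have hperm : (PySem.List.sorted (PySem.Set.ofList A) (fun x => x)).Perm (PySem.Set.ofList A) :=
    PySem.List.sorted_perm (PySem.Set.ofList A) (fun x => x) false
  set S := PySem.Set.ofList A with hS
  set U := PySem.List.sorted S (fun x => x) with hUdef
  have hpw : U.Pairwise (· < ·) := hU ▸ dd_pairwise _ (PySem.List.sorted_pairwise A (fun x => x))
  have hmem : ∀ z, z ∈ U ↔ z ∈ S := fun z => hperm.mem_iff
  have hlen : U.length = S.length := hperm.length_eq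
  have hfilter : (U.filter (bPred U)).length = (S.filter (bPred S)).length := by
    have : (U.filter (bPred U)) = (U.filter (bPred S)) :=
      List.filter_congr (fun x _ => bPred_congr U S hmem x)
    rw [this, (hperm.filter (bPred S)).length_eq]
  have hAval : solution A = pairSum wB U := by
    simp only [solution]
    rw [loop_eq_pairSum, pairSum_dd, ← hU]
  rw [hAval, pairSum_count U hpw]
  simp only [solution_alt, ← hS]
  have hempty : (U = []) ↔ (S = []) := by
    rw [List.eq_nil_iff_forall_not_mem, List.eq_nil_iff_forall_not_mem]
    constructor
    · intro hU x hx; exact hU x ((hmem x).2 hx)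
    · intro hS' x hx; exact hS' x ((hmem x).1 hx)
  by_cases hSe : S = []
  · simp [hSe, hempty.2 hSe]
  · rw [if_neg (fun hUe => hSe (hempty.1 hUe)), if_neg hSe, hlen, hfilter]
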